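-- pv_equiv track=rewrite | github.com/SirPoko/Lexer-Poko | lexerPoko.py | meb
-- ===== SOURCE A (Python) =====
-- ESTADO_FINAL = "ESTADO FINAL"
--
-- ESTADO_NO_FINAL = "NO ACEPTADO"
--
-- ESTADO_TRAMPA = "EN ESTADO TRAMPA"
--
-- def meb(cadena):
--     estado = 0
--     estados_aceptados = [1]
--     delta = {0:{' ':1, '\n':1, '\t':1}, 1:{}}
--     for caracter in cadena:
--         if caracter in delta[estado].keys():
--             estado = delta[estado][caracter]
--         else:
--             estado = -1
--             break
--     if estado == -1:
--         return ESTADO_TRAMPA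
--     if estado in estados_aceptados:
--         return ESTADO_FINAL
--     else:
--         return ESTADO_NO_FINAL
-- ===== SOURCE B (Python) =====
-- ESTADO_FINAL = "ESTADO FINAL"
-- ESTADO_NO_FINAL = "NO ACEPTADO"
-- ESTADO_TRAMPA = "EN ESTADO TRAMPA"
--
-- def meb(cadena):
--     # The DFA accepts exactly one whitespace character: closed-form check.
--     if not cadena:
--         return ESTADO_NO_FINAL
--     if len(cadena) == 1 and cadena[0] in (' ', '\n', '\t'):
--         return ESTADO_FINAL
--     return ESTADO_TRAMPA
-- ===== Notes on version B (the rewrite author's own statement) =====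
-- stated objective: simpler
-- what changed: Replaces the DFA table and transition loop with a closed-form check: empty string is not accepted, a single whitespace character is final, anything else is trap.
import Mathlib
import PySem

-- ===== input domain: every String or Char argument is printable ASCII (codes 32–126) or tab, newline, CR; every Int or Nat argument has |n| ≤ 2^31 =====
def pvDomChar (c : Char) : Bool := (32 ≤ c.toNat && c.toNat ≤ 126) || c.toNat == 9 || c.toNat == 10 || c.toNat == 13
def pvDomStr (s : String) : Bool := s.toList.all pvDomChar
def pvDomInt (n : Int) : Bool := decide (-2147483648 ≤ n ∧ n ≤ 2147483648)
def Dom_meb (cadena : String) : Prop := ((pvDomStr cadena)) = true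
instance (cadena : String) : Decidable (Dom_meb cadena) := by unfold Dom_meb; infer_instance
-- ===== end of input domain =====

-- B replaces A's DFA table and transition loop with a closed-form length/character check (simpler).

-- ===== PORT A =====
def mebEstadoFinal : String := "ESTADO FINAL"
def mebEstadoNoFinal : String := "NO ACEPTADO"
def mebEstadoTrampa : String := "EN ESTADO TRAMPA"

-- delta = {0:{' ':1, '\n':1, '\t':1}, 1:{}}
def mebDelta : PySem.Dict Int (PySem.Dict Char Int) :=
  (PySem.Dict.empty.insert 0
      (((PySem.Dict.empty.insert ' ' 1).insert '\n' 1).insert '\t' 1)).insert 1 PySem.Dict.empty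

-- the for-loop with break: returns the final 'estado'.
-- delta[estado] is looked up with getD ∅; exact here since estado is always 0 or 1 when the
-- loop body runs (the loop breaks as soon as estado is set to -1), and both keys are present.
def mebLoop : List Char → Int → Int
  | [], estado => estado
  | caracter :: rest, estado =>
    let fila := (mebDelta.getD estado PySem.Dict.empty)
    match fila.get? caracter with
    | some e => mebLoop rest e
    | none => -1   -- estado = -1; break

def meb (cadena : String) : String :=
  let estado : Int := 0
  let estados_aceptados : List Int := [1]
  let estado := mebLoop cadena.toList estado
  if estado = -1 then mebEstadoTrampa
  else if estado ∈ estados_aceptados then mebEstadoFinal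
  else mebEstadoNoFinal

-- ===== PORT B =====
def meb_alt (cadena : String) : String :=
  match cadena.toList with
  | [] => mebEstadoNoFinal
  | [c] => if c ∈ [' ', '\n', '\t'] then mebEstadoFinal else mebEstadoTrampa
  | _ :: _ :: _ => mebEstadoTrampa

-- ===== PRECONDITION & SPEC =====
def Spec_meb (cadena : String) (out : String) : Prop := out = meb_alt cadena
instance (cadena : String) (out : String) : Decidable (Spec_meb cadena out) := by unfold Spec_meb; infer_instance

-- ===== CLAIM (what is proved, stated in full; the proofs are below) =====
def Claim_equal_meb : Prop := ∀ (cadena : String), Dom_meb cadena → Spec_meb cadena (meb cadena)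

-- ===== LEMMAS AND PROOFS =====
-- from state 1 (accepting, no outgoing transitions) any further character traps.
theorem mebLoop_one (cs : List Char) : mebLoop cs 1 = if cs = [] then 1 else -1 := by
  cases cs with
  | nil => simp [mebLoop]
  | cons c rest => simp [mebLoop, mebDelta, PySem.Dict.getD, PySem.Dict.get?,
      PySem.Dict.insert, PySem.Dict.empty]

theorem meb_eq_alt (cadena : String) : meb cadena = meb_alt cadena := by
  unfold meb meb_alt
  cases h : cadena.toList with
  | nil => simp [mebLoop]
  | cons c rest =>
    by_cases hc : c = ' ' ∨ c = '\n' ∨ c = '\t'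
    · have hrow : (PySem.Dict.getD mebDelta 0 PySem.Dict.empty).get? c = some 1 := by
        rcases hc with rfl | rfl | rfl <;> rfl
      simp only [mebLoop, hrow]
      rw [mebLoop_one rest]
      cases rest with
      | nil => rcases hc with rfl | rfl | rfl <;> simp
      | cons d rs =>
        have : mebEstadoTrampa ≠ mebEstadoFinal := by decide
        simp [mebEstadoTrampa]
    · have hrow : (PySem.Dict.getD mebDelta 0 PySem.Dict.empty).get? c = none := by
        simp [mebDelta, PySem.Dict.getD, PySem.Dict.get?, PySem.Dict.insert, PySem.Dict.empty]
        rw [not_or, not_or] at hc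
        exact ⟨fun h => hc.1 h.symm, fun h => hc.2.1 h.symm, fun h => hc.2.2 h.symm⟩
      simp only [mebLoop, hrow]
      cases rest with
      | nil => simp [hc]
      | cons d rs => rfl

-- ===== VERDICT (by name: the statement is the Claim_ definition above) =====
theorem meb_spec : Claim_equal_meb := by
  intro cadena _
  exact meb_eq_alt cadena
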